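-- pv_equiv track=rewrite | github.com/hovietmanh/IT3160-Railway-Singapore | backend/scripts/rawprocessing.py | chain_ways
-- ===== SOURCE A (Python) =====
-- def chain_ways(way_refs, way_map):
--     """
--     Given an ordered list of way IDs from a relation, stitch them into a
--     single ordered list of node IDs.  Handles both forward and reversed ways.
--     """
--     segments = []
--     for wid in way_refs:
--         w = way_map.get(wid)
--         if w and len(w.get("nodes", [])) >= 2:
--             segments.append(list(w["nodes"]))
--
--     if not segments:
--         return []
--
--     chain = segments[0][:]
--     remaining = list(segments[1:])
--
--     for _ in range(len(remaining) + 1):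
--         if not remaining:
--             break
--         joined = False
--         for i, seg in enumerate(remaining):
--             if chain[-1] == seg[0]:           # forward append
--                 chain.extend(seg[1:])
--             elif chain[-1] == seg[-1]:         # reversed append
--                 chain.extend(reversed(seg[:-1]))
--             elif chain[0] == seg[-1]:          # forward prepend
--                 chain = seg[:-1] + chain
--             elif chain[0] == seg[0]:           # reversed prepend
--                 chain = list(reversed(seg))[:-1] + chain
--             else:
--                 continue
--             remaining.pop(i)
--             joined = True
--             break
--         if not joined:
--             chain.extend(remaining[0])
--             remaining.pop(0)
--
--     return chain
-- ===== SOURCE B (Python) =====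
-- def chain_ways(way_refs, way_map):
--     segments = []
--     for wid in way_refs:
--         w = way_map.get(wid)
--         if w and len(w.get("nodes", [])) >= 2:
--             segments.append(list(w["nodes"]))
--     if not segments:
--         return []
--     n = len(segments)
--     # endpoint -> ascending list of segment indices having that node as an end
--     pairs = []
--     for i in range(1, n):
--         s = segments[i]
--         pairs.append((s[0], i))
--         if s[-1] != s[0]:
--             pairs.append((s[-1], i))
--     ends = {}
--     for v, i in pairs:
--         ends.setdefault(v, []).append(i)
--     alive = [False] + [True] * (n - 1)
--     front = []          # reversed prefix of the chain
--     back = list(segments[0])    # chain == front[::-1] + back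
--     for _ in range(n - 1):
--         head = front[-1] if front else back[0]
--         tail = back[-1]
--         cands = [i for i in ends.get(tail, []) if alive[i]]
--         cands += [i for i in ends.get(head, []) if alive[i]]
--         if cands:
--             i = min(cands)
--             s = segments[i]
--             if tail == s[0]:
--                 back.extend(s[1:])
--             elif tail == s[-1]:
--                 back.extend(reversed(s[:-1]))
--             elif head == s[-1]:
--                 front.extend(reversed(s[:-1]))
--             else:
--                 front.extend(s[1:])
--             alive[i] = False
--         else:
--             f = next(j for j in range(n) if alive[j])
--             back.extend(segments[f])
--             alive[f] = False
--     front.reverse()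
--     return front + back
-- ===== Notes on version B (the rewrite author's own statement) =====
-- stated objective: alternative
-- what changed: Replaced A's per-step linear rescan of the remaining segment list by a one-time endpoint-to-segment-index dictionary with an alive mask (each step joins the minimum-index matching segment, which provably equals A's first match), and builds the chain as a front/back pair instead of re-allocating a new list on every prepend.
import Mathlib
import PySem

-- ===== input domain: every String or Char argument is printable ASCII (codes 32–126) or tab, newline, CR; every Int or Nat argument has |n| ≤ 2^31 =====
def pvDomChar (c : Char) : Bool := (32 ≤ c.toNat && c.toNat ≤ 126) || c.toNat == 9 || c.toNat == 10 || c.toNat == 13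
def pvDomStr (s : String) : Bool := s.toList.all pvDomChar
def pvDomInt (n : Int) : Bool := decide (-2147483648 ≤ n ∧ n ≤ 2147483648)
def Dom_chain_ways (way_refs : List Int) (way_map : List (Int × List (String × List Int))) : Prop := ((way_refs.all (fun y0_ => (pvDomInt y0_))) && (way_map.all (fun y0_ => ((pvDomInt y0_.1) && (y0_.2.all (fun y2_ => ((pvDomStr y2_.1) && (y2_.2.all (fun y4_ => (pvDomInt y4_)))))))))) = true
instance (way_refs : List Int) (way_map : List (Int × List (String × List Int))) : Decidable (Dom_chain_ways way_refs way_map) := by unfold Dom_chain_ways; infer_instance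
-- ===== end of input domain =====

-- B replaces A's repeated linear rescan of `remaining` by a one-time endpoint-to-segment-indices
-- dictionary plus an alive mask (the joined segment each step is the minimum-index match), and
-- builds the chain as a front/back pair instead of re-allocating on every prepend (objective: alternative).

-- ===== PORT A =====
-- segments = [list(w["nodes"]) for wid ... if w truthy and len(nodes) >= 2]
def pvSegsA (way_refs : List Int) (way_map : List (Int × List (String × List Int))) : List (List Int) :=
  way_refs.foldl (fun segments wid =>
    match (PySem.Dict.mk way_map).get? wid with
    | none => segments
    | some w =>
      if w ≠ [] ∧ 2 ≤ ((PySem.Dict.mk w).getD "nodes" []).length then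
        segments ++ [(PySem.Dict.mk w).getD "nodes" []]
      else segments) []

-- A's inner `for i, seg in enumerate(remaining)` with the four join conditions, pop(i) and break:
-- returns (new chain, new remaining) at the first matching segment, none if no segment matches.
-- chain[-1] / chain[0] never raise here (chain is nonempty whenever this is called): `.getD 0`.
def pvInnerA (chain : List Int) : List (List Int) → Option (List Int × List (List Int))
  | [] => none
  | seg :: rest =>
    if (PySem.List.pyGet? chain (-1)).getD 0 = (PySem.List.pyGet? seg 0).getD 0 then
      some (chain ++ PySem.List.slice seg (some 1) none, rest)
    else if (PySem.List.pyGet? chain (-1)).getD 0 = (PySem.List.pyGet? seg (-1)).getD 0 then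
      some (chain ++ (PySem.List.slice seg none (some (-1))).reverse, rest)
    else if (PySem.List.pyGet? chain 0).getD 0 = (PySem.List.pyGet? seg (-1)).getD 0 then
      some (PySem.List.slice seg none (some (-1)) ++ chain, rest)
    else if (PySem.List.pyGet? chain 0).getD 0 = (PySem.List.pyGet? seg 0).getD 0 then
      some (PySem.List.slice seg.reverse none (some (-1)) ++ chain, rest)
    else
      match pvInnerA chain rest with
      | none => none
      | some (c, r) => some (c, seg :: r)

-- `for _ in range(len(remaining)+1)`: fuel = len(remaining)+1; break when remaining is empty;
-- the `if not joined` arm extends the chain with remaining[0] and pops it.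
def pvLoopA : Nat → List Int → List (List Int) → List Int
  | 0, chain, _ => chain
  | fuel+1, chain, rem =>
    match rem with
    | [] => chain
    | r0 :: rs =>
      match pvInnerA chain (r0 :: rs) with
      | some (c, r) => pvLoopA fuel c r
      | none => pvLoopA fuel (chain ++ r0) rs

def chain_ways (way_refs : List Int) (way_map : List (Int × List (String × List Int))) : List Int :=
  match pvSegsA way_refs way_map with
  | [] => []
  | s0 :: rest => pvLoopA (rest.length + 1) s0 rest

-- ===== PORT B =====
def pvSegsB (way_refs : List Int) (way_map : List (Int × List (String × List Int))) : List (List Int) :=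
  way_refs.foldl (fun segments wid =>
    match (PySem.Dict.mk way_map).get? wid with
    | none => segments
    | some w =>
      if w ≠ [] ∧ 2 ≤ ((PySem.Dict.mk w).getD "nodes" []).length then
        segments ++ [(PySem.Dict.mk w).getD "nodes" []]
      else segments) []

-- pairs: (endpoint node, segment index) for every segment 1..n-1 (tail endpoint skipped if equal)
-- segments[i] with 1 ≤ i < n never raises: `.getD`; the index is stored as its Nat value.
def pvPairsB (segs : List (List Int)) : List (Int × Nat) :=
  (PySem.List.pyRange 1 (segs.length : Int)).foldl (fun pairs i =>
    let s := (PySem.List.pyGet? segs i).getD []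
    let p1 := pairs ++ [((PySem.List.pyGet? s 0).getD 0, i.toNat)]
    if (PySem.List.pyGet? s (-1)).getD 0 ≠ (PySem.List.pyGet? s 0).getD 0 then
      p1 ++ [((PySem.List.pyGet? s (-1)).getD 0, i.toNat)]
    else p1) []

-- ends = {}; for v, i in pairs: ends.setdefault(v, []).append(i)
def pvEndsB (pairs : List (Int × Nat)) : PySem.Dict Int (List Nat) :=
  pairs.foldl (fun d p => d.modify p.1 [] (fun x => x ++ [p.2])) PySem.Dict.empty

-- one iteration of B's `for _ in range(n - 1)` over the state (front, back, alive);
-- alive[i] reads and segments[i]/segments[f] are always in range: `.getD`;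
-- `next(j for j in range(n) if alive[j])` is the find? over range(n) (never exhausted here).
def pvStepB (segs : List (List Int)) (ends : PySem.Dict Int (List Nat)) :
    List Int × List Int × List Bool → List Int × List Int × List Bool :=
  fun st =>
    let front := st.1; let back := st.2.1; let alive := st.2.2
    let head := if front ≠ [] then (PySem.List.pyGet? front (-1)).getD 0
                else (PySem.List.pyGet? back 0).getD 0
    let tail := (PySem.List.pyGet? back (-1)).getD 0
    let cands := (ends.getD tail []).filter (fun i => alive.getD i false)
                 ++ (ends.getD head []).filter (fun i => alive.getD i false)
    match cands with
    | [] =>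
      let f := ((List.range segs.length).find? (fun j => alive.getD j false)).getD 0
      (front, back ++ segs.getD f [], alive.set f false)
    | c0 :: cs =>
      let i := (PySem.List.min? (c0 :: cs) (fun x => x)).getD 0
      let s := segs.getD i []
      if tail = (PySem.List.pyGet? s 0).getD 0 then
        (front, back ++ PySem.List.slice s (some 1) none, alive.set i false)
      else if tail = (PySem.List.pyGet? s (-1)).getD 0 then
        (front, back ++ (PySem.List.slice s none (some (-1))).reverse, alive.set i false)
      else if head = (PySem.List.pyGet? s (-1)).getD 0 then
        (front ++ (PySem.List.slice s none (some (-1))).reverse, back, alive.set i false)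
      else
        (front ++ PySem.List.slice s (some 1) none, back, alive.set i false)

def pvLoopB (segs : List (List Int)) (ends : PySem.Dict Int (List Nat)) :
    Nat → List Int × List Int × List Bool → List Int × List Int × List Bool
  | 0, st => st
  | fuel+1, st => pvLoopB segs ends fuel (pvStepB segs ends st)

def chain_ways_alt (way_refs : List Int) (way_map : List (Int × List (String × List Int))) : List Int :=
  match pvSegsB way_refs way_map with
  | [] => []
  | s0 :: rest =>
    let segs := s0 :: rest
    let ends := pvEndsB (pvPairsB segs)
    let st := pvLoopB segs ends rest.length ([], s0, false :: List.replicate rest.length true)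
    st.1.reverse ++ st.2.1

-- ===== PRECONDITION & SPEC =====
def Spec_chain_ways (way_refs : List Int) (way_map : List (Int × List (String × List Int))) (out : List Int) : Prop := out = chain_ways_alt way_refs way_map
instance (way_refs : List Int) (way_map : List (Int × List (String × List Int))) (out : List Int) : Decidable (Spec_chain_ways way_refs way_map out) := by unfold Spec_chain_ways; infer_instance

-- ===== CLAIM (what is proved, stated in full; the proofs are below) =====
def Claim_equal_chain_ways : Prop := ∀ (way_refs : List Int) (way_map : List (Int × List (String × List Int))), Dom_chain_ways way_refs way_map → Spec_chain_ways way_refs way_map (chain_ways way_refs way_map)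

-- ===== LEMMAS AND PROOFS =====

def pvT (chain : List Int) : Int := (PySem.List.pyGet? chain (-1)).getD 0

def pvH (chain : List Int) : Int := (PySem.List.pyGet? chain 0).getD 0

theorem pvT_decomp (front back : List Int) (hb : back ≠ []) :
    pvT (front.reverse ++ back) = (PySem.List.pyGet? back (-1)).getD 0 := by
  simp [pvT, PySem.List.pyGet?_neg_one, List.getLast?_append]
  cases h : back.getLast? with
  | none => exact absurd (List.getLast?_eq_none_iff.mp h) hb
  | some x => simp

theorem pvH_decomp (front back : List Int) (hb : back ≠ []) :
    pvH (front.reverse ++ back) =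
      if front ≠ [] then (PySem.List.pyGet? front (-1)).getD 0
      else (PySem.List.pyGet? back 0).getD 0 := by
  simp only [pvH, PySem.List.pyGet?_neg_one, PySem.List.pyGet?_zero]
  cases front with
  | nil => simp
  | cons a t =>
    rw [List.getElem?_append_left (by simp), ← List.head?_eq_getElem?, List.head?_reverse]
    simp

theorem pvGetD_set_false (alive : List Bool) (i j : Nat) :
    (alive.set i false).getD j false = if j = i then false else alive.getD j false := by
  simp only [List.getD_eq_getElem?_getD, List.getElem?_set]
  by_cases h : j = i
  · subst h
    by_cases hl : j < alive.length <;> simp [hl]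
  · rw [if_neg (Ne.symm h), if_neg h]

theorem pvGetD_true_lt (alive : List Bool) (i : Nat) (h : alive.getD i false = true) :
    i < alive.length := by
  by_contra hn
  rw [List.getD_eq_getElem?_getD, List.getElem?_eq_none (by omega)] at h
  simp at h

theorem pvFilter_erase_of_nodup (l : List Nat) (hl : l.Nodup) (p : Nat → Bool) (i : Nat)
    (hp : p i = true) :
    l.filter (fun j => !(j == i) && p j) = (l.filter p).erase i := by
  induction l with
  | nil => simp
  | cons a t ih =>
    rcases List.nodup_cons.mp hl with ⟨hna, hnt⟩
    by_cases ha : a = i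
    · subst ha
      have ht : t.filter (fun j => !(j == a) && p j) = t.filter p := by
        apply List.filter_congr
        intro x hx
        have hxa : x ≠ a := fun h => hna (h ▸ hx)
        simp [hxa]
      simp [List.filter_cons, hp, ht]
    · rw [List.filter_cons, List.filter_cons]
      by_cases hpa : p a
      · simp only [hpa, ha, beq_iff_eq, if_true, Bool.and_true, Bool.not_eq_true']
        simp only [beq_eq_false_iff_ne, ne_eq, ha, not_false_eq_true, if_true]
        rw [List.erase_cons_tail (by simpa using ha), ih hnt]
      · simp [hpa, ih hnt]

def pvG0 (s : List Int) : Int := (PySem.List.pyGet? s 0).getD 0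

def pvGl (s : List Int) : Int := (PySem.List.pyGet? s (-1)).getD 0

def pvMtc (h t : Int) (s : List Int) : Bool :=
  decide (t = pvG0 s) || decide (t = pvGl s) || decide (h = pvGl s) || decide (h = pvG0 s)

def pvSegF (segs : List (List Int)) (i : Nat) : List Int := segs.getD i []

theorem pvPairs_eq_flatMap (segs : List (List Int)) :
    pvPairsB segs = (PySem.List.pyRange 1 (segs.length : Int)).flatMap (fun i =>
      let s := (PySem.List.pyGet? segs i).getD []
      (pvG0 s, i.toNat) :: (if pvGl s ≠ pvG0 s then [(pvGl s, i.toNat)] else [])) := by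
  unfold pvPairsB
  rw [PySem.List.foldl_congr_mem (g := fun pairs i =>
    pairs ++ ((pvG0 ((PySem.List.pyGet? segs i).getD []), i.toNat) ::
      (if pvGl ((PySem.List.pyGet? segs i).getD []) ≠ pvG0 ((PySem.List.pyGet? segs i).getD [])
       then [(pvGl ((PySem.List.pyGet? segs i).getD []), i.toNat)] else [])))]
  · rw [PySem.List.foldl_append_eq_flatMap]
    simp
  · intro acc x _
    simp only [pvG0, pvGl]
    split_ifs <;> simp

theorem pvMem_pairs (segs : List (List Int)) (v : Int) (x : Nat) :
    (v, x) ∈ pvPairsB segs ↔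
      (1 ≤ x ∧ x < segs.length ∧ (v = pvG0 (pvSegF segs x) ∨ v = pvGl (pvSegF segs x))) := by
  rw [pvPairs_eq_flatMap, List.mem_flatMap]
  constructor
  · rintro ⟨i, hi, hmem⟩
    rw [PySem.List.mem_pyRange_one] at hi
    have h0 : (0:Int) ≤ i := by omega
    have hseg : (PySem.List.pyGet? segs i).getD [] = pvSegF segs i.toNat := by
      rw [PySem.List.pyGet?_of_nonneg segs h0]
      simp [pvSegF, List.getD_eq_getElem?_getD]
    simp only [hseg] at hmem
    have hx : x = i.toNat ∧ (v = pvG0 (pvSegF segs i.toNat) ∨ v = pvGl (pvSegF segs i.toNat)) := by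
      rcases List.mem_cons.mp hmem with h | h
      · obtain ⟨hv, hx⟩ := Prod.mk.injEq .. ▸ h
        exact ⟨hx, Or.inl hv⟩
      · split_ifs at h with hne
        · simp only [List.mem_singleton, Prod.mk.injEq] at h
          exact ⟨h.2, Or.inr h.1⟩
        · simp at h
    obtain ⟨hx1, hx2⟩ := hx
    subst hx1
    refine ⟨by omega, by omega, hx2⟩
  · rintro ⟨h1, h2, hv⟩
    refine ⟨(x : Int), ?_, ?_⟩
    · rw [PySem.List.mem_pyRange_one]
      constructor <;> [exact_mod_cast h1; exact_mod_cast h2]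
    · have hseg : (PySem.List.pyGet? segs (x : Int)).getD [] = pvSegF segs x := by
        rw [PySem.List.pyGet?_of_nonneg segs (by positivity)]
        simp [pvSegF, List.getD_eq_getElem?_getD]
      simp only [hseg, Int.toNat_natCast]
      rcases hv with hv | hv
      · subst hv; exact List.mem_cons_self
      · by_cases hne : pvGl (pvSegF segs x) = pvG0 (pvSegF segs x)
        · subst hv; rw [hne]; exact List.mem_cons_self
        · subst hv
          simp [hne]

theorem pvMem_ends (pairs : List (Int × Nat)) (v : Int) (x : Nat) :
    x ∈ (pvEndsB pairs).getD v [] ↔ (v, x) ∈ pairs := by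
  unfold pvEndsB
  rw [PySem.Dict.getD_foldl_modify_append]
  simp only [PySem.Dict.getD_empty, List.nil_append, List.mem_map, List.mem_filter]
  constructor
  · rintro ⟨⟨pv, px⟩, ⟨hmem, hpv⟩, hpx⟩
    simp at hpv hpx
    subst hpv hpx
    exact hmem
  · intro h
    exact ⟨(v, x), ⟨h, by simp⟩, rfl⟩

def pvApplyA (chain s : List Int) : List Int :=
  if pvT chain = pvG0 s then chain ++ PySem.List.slice s (some 1) none
  else if pvT chain = pvGl s then chain ++ (PySem.List.slice s none (some (-1))).reverse
  else if pvH chain = pvGl s then PySem.List.slice s none (some (-1)) ++ chain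
  else PySem.List.slice s.reverse none (some (-1)) ++ chain

theorem pvInnerA_none (chain : List Int) (rem : List (List Int))
    (h : ∀ s ∈ rem, pvMtc (pvH chain) (pvT chain) s = false) :
    pvInnerA chain rem = none := by
  induction rem with
  | nil => rfl
  | cons seg rest ih =>
    have hseg := h seg List.mem_cons_self
    simp only [pvMtc, Bool.or_eq_false_iff, decide_eq_false_iff_not] at hseg
    obtain ⟨⟨⟨h1, h2⟩, h3⟩, h4⟩ := hseg
    simp only [pvT, pvH, pvG0, pvGl] at h1 h2 h3 h4
    unfold pvInnerA
    rw [if_neg h1, if_neg h2, if_neg h3, if_neg h4,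
        ih (fun s hs => h s (List.mem_cons_of_mem _ hs))]

theorem pvInnerA_split (chain : List Int) (pre post : List (List Int)) (seg : List Int)
    (hpre : ∀ s ∈ pre, pvMtc (pvH chain) (pvT chain) s = false)
    (hseg : pvMtc (pvH chain) (pvT chain) seg = true) :
    pvInnerA chain (pre ++ seg :: post) = some (pvApplyA chain seg, pre ++ post) := by
  induction pre with
  | nil =>
    simp only [List.nil_append]
    unfold pvInnerA pvApplyA
    simp only [pvMtc, Bool.or_eq_true, decide_eq_true_eq, pvT, pvH, pvG0, pvGl] at hseg ⊢
    split_ifs with h1 h2 h3 h4 <;> first | rfl | tauto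
  | cons p ps ih =>
    have hp := hpre p List.mem_cons_self
    simp only [pvMtc, Bool.or_eq_false_iff, decide_eq_false_iff_not] at hp
    obtain ⟨⟨⟨h1, h2⟩, h3⟩, h4⟩ := hp
    simp only [pvT, pvH, pvG0, pvGl] at h1 h2 h3 h4
    have := ih (fun s hs => hpre s (List.mem_cons_of_mem _ hs))
    simp only [List.cons_append]
    unfold pvInnerA
    rw [if_neg h1, if_neg h2, if_neg h3, if_neg h4, this]

theorem pvMem_cands (segs : List (List Int)) (alive : List Bool) (h t : Int)
    (hlen : alive.length = segs.length) (h0 : alive.getD 0 false = false) (x : Nat) :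
    (x ∈ ((pvEndsB (pvPairsB segs)).getD t []).filter (fun i => alive.getD i false)
        ++ ((pvEndsB (pvPairsB segs)).getD h []).filter (fun i => alive.getD i false))
    ↔ (alive.getD x false = true ∧ pvMtc h t (pvSegF segs x) = true) := by
  simp only [List.mem_append, List.mem_filter, pvMem_ends, pvMem_pairs, pvMtc,
    Bool.or_eq_true, decide_eq_true_eq]
  constructor
  · rintro (⟨⟨_, _, hv⟩, hp⟩ | ⟨⟨_, _, hv⟩, hp⟩) <;> exact ⟨hp, by tauto⟩
  · rintro ⟨hp, hm⟩
    have hx1 : x ≠ 0 := by rintro rfl; rw [h0] at hp; exact absurd hp (by simp)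
    have hx1' : 1 ≤ x := by omega
    have hx2 : x < segs.length := hlen ▸ pvGetD_true_lt _ _ hp
    tauto

theorem pvFilter_set (alive : List Bool) (n : Nat) (m : Nat)
    (hm : alive.getD m false = true) :
    (List.range n).filter (fun j => (alive.set m false).getD j false)
      = ((List.range n).filter (fun j => alive.getD j false)).erase m := by
  have h1 : (List.range n).filter (fun j => (alive.set m false).getD j false)
      = (List.range n).filter (fun j => !(j == m) && alive.getD j false) := by
    apply List.filter_congr
    intro x _
    rw [pvGetD_set_false]
    by_cases hx : x = m <;> simp [hx]
  rw [h1, pvFilter_erase_of_nodup _ (List.nodup_range) _ _ hm]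

theorem pvLoop_eq (segs : List (List Int)) :
    ∀ (k : Nat) (front back : List Int) (alive : List Bool),
    alive.length = segs.length →
    alive.getD 0 false = false →
    back ≠ [] →
    ((List.range segs.length).filter (fun j => alive.getD j false)).length = k →
    pvLoopA (k+1) (front.reverse ++ back)
        (((List.range segs.length).filter (fun j => alive.getD j false)).map (pvSegF segs))
      = (pvLoopB segs (pvEndsB (pvPairsB segs)) k (front, back, alive)).1.reverse
        ++ (pvLoopB segs (pvEndsB (pvPairsB segs)) k (front, back, alive)).2.1 := by
  intro k
  induction k with
  | zero =>
    intro front back alive hlen h0 hb hk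
    rw [List.length_eq_zero_iff.mp hk]
    simp [pvLoopA, pvLoopB]
  | succ k ih =>
    intro front back alive hlen h0 hb hk
    set n := segs.length with hn
    set p : Nat → Bool := fun j => alive.getD j false with hp
    set idxs := (List.range n).filter p with hidxs_def
    obtain ⟨i0, rest0, hidxs⟩ : ∃ i0 rest0, idxs = i0 :: rest0 := by
      cases hcase : idxs with
      | nil => rw [hcase] at hk; simp at hk
      | cons a b => exact ⟨a, b, rfl⟩
    set ends := pvEndsB (pvPairsB segs) with hends
    set chain := front.reverse ++ back with hchain
    set t := (PySem.List.pyGet? back (-1)).getD 0 with ht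
    set h := (if front ≠ [] then (PySem.List.pyGet? front (-1)).getD 0
              else (PySem.List.pyGet? back 0).getD 0) with hh
    have hT : pvT chain = t := pvT_decomp front back hb
    have hH : pvH chain = h := by rw [hchain, pvH_decomp front back hb]
    set cands := (ends.getD t []).filter p ++ (ends.getD h []).filter p with hcands
    have hmemc : ∀ x, x ∈ cands ↔ (p x = true ∧ pvMtc h t (pvSegF segs x) = true) :=
      pvMem_cands segs alive h t hlen h0
    have hmem_idxs : ∀ x, x ∈ idxs ↔ p x = true := by
      intro x
      rw [hidxs_def]
      simp only [List.mem_filter, List.mem_range]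
      constructor
      · rintro ⟨_, h2⟩; exact h2
      · intro hx
        refine ⟨?_, hx⟩
        have := pvGetD_true_lt _ _ hx
        omega
    have hsort : idxs.Pairwise (· < ·) :=
      List.Pairwise.sublist List.filter_sublist List.pairwise_lt_range
    have hnodup : idxs.Nodup := hsort.imp Nat.ne_of_lt
    have hstep : pvLoopB segs ends (k+1) (front, back, alive)
        = pvLoopB segs ends k (pvStepB segs ends (front, back, alive)) := rfl
    have hloopA : pvLoopA (k+1+1) chain (idxs.map (pvSegF segs))
        = match pvInnerA chain (idxs.map (pvSegF segs)) with
          | some (c, r) => pvLoopA (k+1) c r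
          | none => pvLoopA (k+1) (chain ++ pvSegF segs i0) (rest0.map (pvSegF segs)) := by
      rw [hidxs]
      simp only [List.map_cons, pvLoopA]
    rw [hloopA, hstep]
    cases hc : cands with
    | nil =>
      have hfind : (List.range n).find? p = some i0 := by
        rw [← List.head?_filter, ← hidxs_def, hidxs]; rfl
      have hsv : pvStepB segs ends (front, back, alive)
          = (front, back ++ segs.getD i0 [], alive.set i0 false) := by
        simp only [pvStepB]
        rw [← ht, ← hh, ← hcands, hc, hfind]
        rfl
      have hnone : pvInnerA chain (idxs.map (pvSegF segs)) = none := by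
        apply pvInnerA_none
        intro s hs
        rw [List.mem_map] at hs
        obtain ⟨j, hj, rfl⟩ := hs
        rw [hT, hH]
        by_contra hcon
        have hj' : j ∈ cands := (hmemc j).mpr ⟨(hmem_idxs j).mp hj, by simpa using hcon⟩
        rw [hc] at hj'
        simp at hj'
      rw [hnone, hsv]
      have hp0 : alive.getD i0 false = true := (hmem_idxs i0).mp (hidxs ▸ List.mem_cons_self)
      have hfe : (List.range n).filter (fun j => (alive.set i0 false).getD j false) = rest0 := by
        rw [pvFilter_set alive n i0 hp0, ← hidxs_def, hidxs, List.erase_cons_head]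
      have hih := ih front (back ++ pvSegF segs i0) (alive.set i0 false)
        (by rw [List.length_set]; exact hlen)
        (by rw [pvGetD_set_false]; split_ifs <;> first | rfl | exact h0)
        (by simp [hb])
        (by rw [hfe]; have : idxs.length = k + 1 := hk
            rw [hidxs] at this; simpa using this)
      rw [hfe] at hih
      rw [hchain, List.append_assoc] at *
      exact hih
    | cons c0 cs =>
      obtain ⟨m, hmin⟩ : ∃ m, PySem.List.min? (c0 :: cs) (fun x => x) = some m := by
        cases hmn : PySem.List.min? (c0 :: cs) (fun x => x) with
        | none => exact absurd ((PySem.List.min?_eq_none_iff _ _).mp hmn) (by simp)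
        | some m => exact ⟨m, rfl⟩
      have hmmem : m ∈ cands := by rw [hc]; exact PySem.List.min?_mem hmin
      obtain ⟨hpm, hmtc⟩ := (hmemc m).mp hmmem
      have hpm' : alive.getD m false = true := hpm
      have hlb : ∀ y ∈ cands, m ≤ y := by
        intro y hy
        rw [hc] at hy
        exact PySem.List.min?_isMin hmin y hy
      have hm_idx : m ∈ idxs := (hmem_idxs m).mpr hpm
      obtain ⟨pre, post, hsplit⟩ := List.mem_iff_append.mp hm_idx
      have hpre_lt : ∀ j ∈ pre, j < m := by
        have hps := hsplit ▸ hsort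
        rcases List.pairwise_append.mp hps with ⟨_, _, hcross⟩
        exact fun j hj => hcross j hj m List.mem_cons_self
      have hpre_nm : ∀ s ∈ pre.map (pvSegF segs), pvMtc (pvH chain) (pvT chain) s = false := by
        intro s hs
        rw [List.mem_map] at hs
        obtain ⟨j, hj, rfl⟩ := hs
        rw [hT, hH]
        by_contra hcon
        have hjc : j ∈ cands := (hmemc j).mpr
          ⟨(hmem_idxs j).mp (hsplit ▸ List.mem_append_left _ hj), by simpa using hcon⟩
        exact absurd (hpre_lt j hj) (not_lt.mpr (hlb j hjc))
      have hinner : pvInnerA chain (idxs.map (pvSegF segs))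
          = some (pvApplyA chain (pvSegF segs m), pre.map (pvSegF segs) ++ post.map (pvSegF segs)) := by
        rw [hsplit, List.map_append, List.map_cons]
        exact pvInnerA_split chain _ _ _ hpre_nm (by rw [hT, hH]; exact hmtc)
      rw [hinner]
      have hm0 : m ≠ 0 := by
        rintro rfl
        rw [h0] at hpm'
        exact absurd hpm' (by simp)
      have hprem : m ∉ pre := fun hmem => absurd (hpre_lt m hmem) (lt_irrefl m)
      have hfe : (List.range n).filter (fun j => (alive.set m false).getD j false) = pre ++ post := by
        rw [pvFilter_set alive n m hpm', ← hidxs_def, hsplit,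
            List.erase_append_right _ hprem, List.erase_cons_head]
      have hk' : (pre ++ post).length = k := by
        have : idxs.length = k + 1 := hk
        rw [hsplit] at this
        simp at this ⊢
        omega
      have hlen' : (alive.set m false).length = segs.length := by
        rw [List.length_set]; exact hlen
      have h0' : (alive.set m false).getD 0 false = false := by
        rw [pvGetD_set_false]; split_ifs <;> first | rfl | exact h0
      have hsv : pvStepB segs ends (front, back, alive)
          = (if t = (PySem.List.pyGet? (segs.getD ((PySem.List.min? (c0 :: cs) (fun x => x)).getD 0) []) 0).getD 0 then
               (front, back ++ PySem.List.slice (segs.getD ((PySem.List.min? (c0 :: cs) (fun x => x)).getD 0) []) (some 1) none, alive.set ((PySem.List.min? (c0 :: cs) (fun x => x)).getD 0) false)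
             else if t = (PySem.List.pyGet? (segs.getD ((PySem.List.min? (c0 :: cs) (fun x => x)).getD 0) []) (-1)).getD 0 then
               (front, back ++ (PySem.List.slice (segs.getD ((PySem.List.min? (c0 :: cs) (fun x => x)).getD 0) []) none (some (-1))).reverse, alive.set ((PySem.List.min? (c0 :: cs) (fun x => x)).getD 0) false)
             else if h = (PySem.List.pyGet? (segs.getD ((PySem.List.min? (c0 :: cs) (fun x => x)).getD 0) []) (-1)).getD 0 then
               (front ++ (PySem.List.slice (segs.getD ((PySem.List.min? (c0 :: cs) (fun x => x)).getD 0) []) none (some (-1))).reverse, back, alive.set ((PySem.List.min? (c0 :: cs) (fun x => x)).getD 0) false)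
             else
               (front ++ PySem.List.slice (segs.getD ((PySem.List.min? (c0 :: cs) (fun x => x)).getD 0) []) (some 1) none, back, alive.set ((PySem.List.min? (c0 :: cs) (fun x => x)).getD 0) false)) := by
        simp only [pvStepB]
        rw [← ht, ← hh, ← hcands, hc]
      rw [hmin] at hsv
      simp only [Option.getD_some] at hsv
      rw [hsv]
      have happ : pvApplyA chain (pvSegF segs m)
          = (if t = (PySem.List.pyGet? (segs.getD m []) 0).getD 0 then
               chain ++ PySem.List.slice (segs.getD m []) (some 1) none
             else if t = (PySem.List.pyGet? (segs.getD m []) (-1)).getD 0 then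
               chain ++ (PySem.List.slice (segs.getD m []) none (some (-1))).reverse
             else if h = (PySem.List.pyGet? (segs.getD m []) (-1)).getD 0 then
               PySem.List.slice (segs.getD m []) none (some (-1)) ++ chain
             else
               PySem.List.slice (segs.getD m []).reverse none (some (-1)) ++ chain) := by
        unfold pvApplyA
        rw [hT, hH]
        rfl
      rw [happ]
      split_ifs with hcond1 hcond2 hcond3
      · have hih := ih front (back ++ PySem.List.slice (segs.getD m []) (some 1) none)
          (alive.set m false) hlen' h0' (by simp [hb]) (by rw [hfe]; exact hk')
        rw [hfe, List.map_append] at hih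
        rw [hchain, List.append_assoc] at *
        exact hih
      · have hih := ih front (back ++ (PySem.List.slice (segs.getD m []) none (some (-1))).reverse)
          (alive.set m false) hlen' h0' (by simp [hb]) (by rw [hfe]; exact hk')
        rw [hfe, List.map_append] at hih
        rw [hchain, List.append_assoc] at *
        exact hih
      · have hih := ih (front ++ (PySem.List.slice (segs.getD m []) none (some (-1))).reverse)
          back (alive.set m false) hlen' h0' hb (by rw [hfe]; exact hk')
        rw [hfe, List.map_append] at hih
        rw [List.reverse_append, List.reverse_reverse, List.append_assoc] at hih
        rw [hchain]
        exact hih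
      · have hih := ih (front ++ PySem.List.slice (segs.getD m []) (some 1) none)
          back (alive.set m false) hlen' h0' hb (by rw [hfe]; exact hk')
        rw [hfe, List.map_append] at hih
        rw [List.reverse_append, List.append_assoc] at hih
        rw [hchain, PySem.List.slice_to_neg_one, List.dropLast_reverse,
            ← PySem.List.slice_from_one (segs.getD m [])]
        exact hih

theorem pvSegs_len (way_refs : List Int) (way_map : List (Int × List (String × List Int))) :
    ∀ s ∈ pvSegsA way_refs way_map, 2 ≤ s.length := by
  unfold pvSegsA
  suffices h : ∀ (l : List Int) (acc : List (List Int)), (∀ s ∈ acc, 2 ≤ s.length) →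
      ∀ s ∈ l.foldl (fun segments wid =>
        match (PySem.Dict.mk way_map).get? wid with
        | none => segments
        | some w =>
          if w ≠ [] ∧ 2 ≤ ((PySem.Dict.mk w).getD "nodes" []).length then
            segments ++ [(PySem.Dict.mk w).getD "nodes" []]
          else segments) acc, 2 ≤ s.length by
    exact h way_refs [] (by simp)
  intro l
  induction l with
  | nil => intro acc hacc s hs; exact hacc s hs
  | cons a t ih =>
    intro acc hacc s hs
    refine ih _ ?_ s hs
    intro u hu
    beta_reduce at hu
    cases hg : (PySem.Dict.mk way_map).get? a with
    | none => rw [hg] at hu; exact hacc u hu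
    | some w =>
      rw [hg] at hu
      simp only [] at hu
      by_cases hc : w ≠ [] ∧ 2 ≤ ((PySem.Dict.mk w).getD "nodes" []).length
      · rw [if_pos hc] at hu
        rcases List.mem_append.mp hu with h | h
        · exact hacc u h
        · rw [List.mem_singleton.mp h]; exact hc.2
      · rw [if_neg hc] at hu; exact hacc u hu

theorem pvInitFilter (n : Nat) :
    (List.range (n+1)).filter (fun j => (false :: List.replicate n true).getD j false)
      = List.range' 1 n := by
  rw [List.range_succ_eq_map, List.filter_cons]
  simp only [List.getD_cons_zero, if_false]
  rw [List.filter_map]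
  have hall : List.filter ((fun j => (false :: List.replicate n true).getD j false) ∘ Nat.succ)
      (List.range n) = List.range n := by
    rw [List.filter_eq_self]
    intro x hx
    simp only [Function.comp, List.getD_cons_succ]
    exact (List.getD_replicate _ (List.mem_range.mp hx)).symm ▸ rfl
  rw [hall, List.range'_eq_map_range]
  apply List.map_congr_left
  intro x _
  omega

theorem pvInitMap (s0 : List Int) (rest : List (List Int)) :
    (List.range' 1 rest.length).map (pvSegF (s0 :: rest)) = rest := by
  rw [List.range'_eq_map_range, List.map_map]
  apply List.ext_getElem (by simp)
  intro i h1 h2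
  simp only [List.getElem_map, List.getElem_range, Function.comp]
  simp [pvSegF, List.getD_eq_getElem?_getD, Nat.add_comm 1 i, List.getElem?_eq_getElem h2]

theorem pvFinal (way_refs : List Int) (way_map : List (Int × List (String × List Int))) :
    chain_ways way_refs way_map = chain_ways_alt way_refs way_map := by
  unfold chain_ways chain_ways_alt
  have hseq : pvSegsB way_refs way_map = pvSegsA way_refs way_map := rfl
  rw [hseq]
  cases hs : pvSegsA way_refs way_map with
  | nil => rfl
  | cons s0 rest =>
    simp only []
    have hs0 : s0 ≠ [] := by
      have h2 := pvSegs_len way_refs way_map s0 (hs ▸ List.mem_cons_self)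
      intro he; rw [he] at h2; simp at h2
    have hflen : ((List.range (s0 :: rest).length).filter
        (fun j => (false :: List.replicate rest.length true).getD j false)).length = rest.length := by
      rw [show (s0 :: rest).length = rest.length + 1 from rfl, pvInitFilter]
      simp
    have h := pvLoop_eq (s0 :: rest) rest.length [] s0 (false :: List.replicate rest.length true)
      (by simp) rfl hs0 hflen
    rw [show (s0 :: rest).length = rest.length + 1 from rfl, pvInitFilter, pvInitMap] at h
    simpa using h

-- ===== VERDICT (by name: the statement is the Claim_ definition above) =====
theorem chain_ways_spec : Claim_equal_chain_ways := by
  intro way_refs way_map _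
  exact pvFinal way_refs way_map
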